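-- pv_equiv track=rewrite | github.com/XUNZI1314/ML | benchmark_pose_pipeline.py | _snake_fold_order
-- ===== SOURCE A (Python) =====
-- def _snake_fold_order(n_groups: int, n_folds: int) -> list[int]:
--     order: list[int] = []
--     while len(order) < n_groups:
--         order.extend(list(range(n_folds)))
--         if len(order) >= n_groups:
--             break
--         if n_folds > 1:
--             order.extend(list(range(n_folds - 1, -1, -1)))
--     return order[:n_groups]
-- ===== SOURCE B (Python) =====
-- def _snake_fold_order(n_groups: int, n_folds: int) -> list[int]:
--     period = 2 * n_folds
--     out: list[int] = []
--     for i in range(n_groups):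
--         r = i % period
--         out.append(r if r < n_folds else period - 1 - r)
--     return out
-- ===== Notes on version B (the rewrite author's own statement) =====
-- stated objective: alternative
-- what changed: B computes each position directly by a closed-form zigzag formula on the index (r = i % (2*n_folds), value r on the forward half and 2*n_folds-1-r on the backward half), in one pass over range(n_groups), instead of A's repeated extend-with-ranges / length-check / truncate tiling.
import Mathlib
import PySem

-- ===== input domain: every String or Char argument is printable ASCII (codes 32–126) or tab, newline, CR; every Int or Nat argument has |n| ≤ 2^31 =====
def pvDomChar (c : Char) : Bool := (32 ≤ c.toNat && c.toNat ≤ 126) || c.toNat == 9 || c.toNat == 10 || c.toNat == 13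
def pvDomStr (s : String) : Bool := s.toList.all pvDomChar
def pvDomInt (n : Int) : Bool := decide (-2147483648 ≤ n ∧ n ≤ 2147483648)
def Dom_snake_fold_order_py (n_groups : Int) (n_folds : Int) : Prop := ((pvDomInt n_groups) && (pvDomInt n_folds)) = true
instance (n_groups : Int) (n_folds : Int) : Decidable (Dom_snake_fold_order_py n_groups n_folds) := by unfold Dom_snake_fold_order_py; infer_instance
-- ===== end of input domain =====

-- B replaces A's tile-and-truncate loop by a closed-form per-index zigzag formula (alternative algorithm, same behaviour on Pre_).

-- ===== PORT A =====
-- A's while loop; the fuel argument only makes the same computation total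
-- (with 1 ≤ n_folds each iteration adds at least one element, so n_groups.toNat + 1 steps suffice).
def snakeLoopA (n_groups : Int) (n_folds : Int) : Nat → List Int → List Int
  | 0, order => order
  | fuel + 1, order =>
    if (order.length : Int) < n_groups then
      let o1 := order ++ PySem.List.pyRange 0 n_folds 1
      if n_groups ≤ (o1.length : Int) then o1
      else if 1 < n_folds then
        snakeLoopA n_groups n_folds fuel (o1 ++ PySem.List.pyRange (n_folds - 1) (-1) (-1))
      else
        snakeLoopA n_groups n_folds fuel o1
    else order

def snake_fold_order_py (n_groups : Int) (n_folds : Int) : List Int :=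
  PySem.List.slice (snakeLoopA n_groups n_folds (n_groups.toNat + 1) []) none (some n_groups)

-- ===== PORT B =====
-- Source B's for-loop over range(n_groups), appending the closed-form value for each index.
def snake_fold_order_py_alt (n_groups : Int) (n_folds : Int) : List Int :=
  let period := 2 * n_folds
  (PySem.List.pyRange 0 n_groups 1).foldl (fun out i =>
    let r := PySem.Int.mod i period
    out ++ [if r < n_folds then r else period - 1 - r]) []

-- ===== PRECONDITION & SPEC =====
-- Pre_ excludes exactly the inputs (n_folds ≤ 0 with 0 < n_groups) on which the Python A loops forever
-- (the empty range never grows the list), so A returns no value there; B raises/misbehaves there too.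
def Pre_snake_fold_order_py (n_groups : Int) (n_folds : Int) : Prop := n_groups ≤ 0 ∨ 1 ≤ n_folds
instance (n_groups : Int) (n_folds : Int) : Decidable (Pre_snake_fold_order_py n_groups n_folds) := by
  unfold Pre_snake_fold_order_py; infer_instance

def pvWitness_snake_fold_order_py : Int × Int := (7, 3)

def Spec_snake_fold_order_py (n_groups : Int) (n_folds : Int) (out : List Int) : Prop :=
  out = snake_fold_order_py_alt n_groups n_folds
instance (n_groups : Int) (n_folds : Int) (out : List Int) : Decidable (Spec_snake_fold_order_py n_groups n_folds out) := by
  unfold Spec_snake_fold_order_py; infer_instance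

-- ===== CLAIM (what is proved, stated in full; the proofs are below) =====
def Claim_equal_snake_fold_order_py : Prop := ∀ (n_groups : Int) (n_folds : Int), Dom_snake_fold_order_py n_groups n_folds → Pre_snake_fold_order_py n_groups n_folds → Spec_snake_fold_order_py n_groups n_folds (snake_fold_order_py n_groups n_folds)

-- ===== LEMMAS AND PROOFS =====

-- B's per-index value
def snakeF (n : Int) (i : Int) : Int :=
  if PySem.Int.mod i (2 * n) < n then PySem.Int.mod i (2 * n)
  else 2 * n - 1 - PySem.Int.mod i (2 * n)

-- k concatenated copies of pat (the tiling A's loop walks along)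
def patPow (pat : List Int) : Nat → List Int
  | 0 => []
  | k + 1 => patPow pat k ++ pat

lemma take_eq_of_prefix {α : Type} {L1 L2 : List α} (h : L1 <+: L2) {n : Nat}
    (hn : n ≤ L1.length) : L1.take n = L2.take n := by
  obtain ⟨t, rfl⟩ := h
  rw [List.take_append]
  have : n - L1.length = 0 := by omega
  simp [this]

lemma patPow_length (pat : List Int) (k : Nat) :
    (patPow pat k).length = k * pat.length := by
  induction k with
  | zero => simp [patPow]
  | succ k ih => simp [patPow, ih]; ring

lemma patPow_getElem (pat : List Int) (hL : 0 < pat.length) :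
    ∀ (k i : Nat) (hi : i < (patPow pat k).length),
      (patPow pat k)[i] = pat[i % pat.length]'(Nat.mod_lt _ hL) := by
  intro k
  induction k with
  | zero => intro i hi; simp [patPow] at hi
  | succ k ih =>
    intro i hi
    simp only [patPow] at hi ⊢
    by_cases h : i < (patPow pat k).length
    · rw [List.getElem_append_left h]
      exact ih i h
    · have hlen := patPow_length pat k
      have hi' : i - (patPow pat k).length < pat.length := by
        simp [List.length_append] at hi; omega
      rw [List.getElem_append_right (by omega)]
      have : i % pat.length = i - (patPow pat k).length := by
        have : i - k * pat.length < pat.length := by omega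
        have hmod : i % pat.length = (i - k * pat.length) % pat.length := by
          conv_lhs => rw [show i = (i - k * pat.length) + k * pat.length by omega]
          rw [Nat.add_mul_mod_self_right]
        rw [hmod, Nat.mod_eq_of_lt this]
        omega
      simp [this]

lemma snakeF_nonneg_lt (n : Int) (hn : 1 ≤ n) (i : Int) (hi : 0 ≤ i) (hlt : i < 2 * n) :
    snakeF n i = if i < n then i else 2 * n - 1 - i := by
  unfold snakeF
  have hmod : PySem.Int.mod i (2 * n) = i := by
    rw [PySem.Int.mod_eq_emod_of_pos (by omega)]
    exact Int.emod_eq_of_lt hi hlt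
  simp [hmod]

lemma snakeF_periodic (n : Int) (hn : 1 ≤ n) (i : Int) :
    snakeF n (i + 2 * n) = snakeF n i := by
  unfold snakeF
  have : PySem.Int.mod (i + 2 * n) (2 * n) = PySem.Int.mod i (2 * n) := by
    rw [PySem.Int.mod_eq_emod_of_pos (by omega), PySem.Int.mod_eq_emod_of_pos (by omega)]
    rw [show i + 2 * n = i + (2 * n) * 1 by ring, Int.add_mul_emod_self_left]
  simp [this]

-- the pattern A tiles: forward run, then backward run when n_folds > 1
def snakePat (n : Int) : List Int :=
  PySem.List.pyRange 0 n 1 ++ (if 1 < n then PySem.List.pyRange (n - 1) (-1) (-1) else [])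

lemma snakePat_length (n : Int) (hn : 1 ≤ n) :
    (snakePat n).length = if 1 < n then (2 * n).toNat else 1 := by
  unfold snakePat
  by_cases h : 1 < n
  · simp [h, PySem.List.length_pyRange_one, PySem.List.length_pyRange_neg_one]
    omega
  · simp [h, PySem.List.length_pyRange_one]
    omega

lemma snakePat_getElem (n : Int) (hn : 1 ≤ n) (m : Nat) (hm : m < (snakePat n).length) :
    (snakePat n)[m] = snakeF n m := by
  have hlen := snakePat_length n hn
  unfold snakePat at hm ⊢
  by_cases hf : m < n.toNat
  · rw [List.getElem_append_left (by simp [PySem.List.length_pyRange_one]; omega)]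
    rw [PySem.List.getElem_pyRange_one]
    rw [snakeF_nonneg_lt n hn _ (by omega) (by omega)]
    rw [if_pos (by omega)]
    omega
  · -- backward half: only reachable when 1 < n
    have h1 : 1 < n := by
      by_contra h
      have hn1 : n = 1 := by omega
      subst hn1
      rw [if_neg (by omega)] at hm
      simp [PySem.List.length_pyRange_one] at hm
      omega
    simp only [if_pos h1] at hm ⊢
    have hm' : m < (2 * n).toNat := by
      rw [if_pos h1] at hlen
      unfold snakePat at hlen
      rw [if_pos h1] at hlen
      omega
    rw [List.getElem_append_right (by simp [PySem.List.length_pyRange_one]; omega)]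
    simp only [PySem.List.pyRange_neg_one, List.getElem_map, List.getElem_range]
    rw [snakeF_nonneg_lt n hn _ (by omega) (by omega)]
    rw [if_neg (by simp; omega)]
    simp [PySem.List.length_pyRange_one]
    omega

lemma snakeF_add_mul (n : Int) (hn : 1 ≤ n) (r : Int) :
    ∀ q : Nat, snakeF n (r + q * (2 * n)) = snakeF n r := by
  intro q
  induction q with
  | zero => simp
  | succ q ih =>
    have h : r + ((q + 1 : Nat) : Int) * (2 * n) = (r + (q : Nat) * (2 * n)) + 2 * n := by
      push_cast; ring
    rw [h, snakeF_periodic n hn, ih]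

lemma snakeF_mod_pat (n : Int) (hn : 1 ≤ n) (i : Nat) :
    snakeF n i = snakeF n (((i % (snakePat n).length : Nat) : Int)) := by
  have hlen := snakePat_length n hn
  by_cases h1 : 1 < n
  · rw [if_pos h1] at hlen
    rw [hlen]
    have hL : 0 < (2 * n).toNat := by omega
    have h2 : (((2 * n).toNat : Int)) = 2 * n := by omega
    have hcast : (i : Int) = ((i % (2 * n).toNat : Nat) : Int) + ((i / (2 * n).toNat : Nat) : Int) * (2 * n) := by
      calc (i : Int) = ((i % (2 * n).toNat + (2 * n).toNat * (i / (2 * n).toNat) : Nat) : Int) := by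
            rw [Nat.mod_add_div]
        _ = ((i % (2 * n).toNat : Nat) : Int) + ((i / (2 * n).toNat : Nat) : Int) * (2 * n) := by
            push_cast [h2]; ring
    rw [hcast, snakeF_add_mul n hn _ _]
  · -- n = 1 : snakeF is constantly 0 on nonneg inputs
    have hn1 : n = 1 := by omega
    subst hn1
    have const : ∀ (j : Nat), snakeF 1 j = 0 := by
      intro j
      unfold snakeF
      have h0 : (0:Int) ≤ PySem.Int.mod (j:Int) (2*1) := PySem.Int.mod_nonneg _ (by omega)
      have h2 : PySem.Int.mod (j:Int) (2*1) < 2*1 := PySem.Int.mod_lt _ (by omega)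
      split_ifs with h <;> omega
    simp only [const]

lemma snakePat_length_pos (n : Int) (hn : 1 ≤ n) : 0 < (snakePat n).length := by
  rw [snakePat_length n hn]
  split <;> omega

-- A's loop result is a tiling of snakePat, possibly ending mid-pattern after the forward run
lemma loopA_spec (n_groups : Int) (n_folds : Int) (hf : 1 ≤ n_folds) :
    ∀ (fuel k : Nat), n_groups ≤ ((patPow (snakePat n_folds) k).length : Int) + fuel →
    ∃ m, (snakeLoopA n_groups n_folds fuel (patPow (snakePat n_folds) k)
            <+: patPow (snakePat n_folds) m) ∧
      n_groups ≤ ((snakeLoopA n_groups n_folds fuel (patPow (snakePat n_folds) k)).length : Int) := by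
  have hfwdlen : 1 ≤ (PySem.List.pyRange 0 n_folds 1).length := by
    rw [PySem.List.length_pyRange_one]; omega
  have hpatlen := snakePat_length_pos n_folds hf
  intro fuel
  induction fuel with
  | zero =>
    intro k hk
    exact ⟨k, List.prefix_refl _, by simpa using hk⟩
  | succ fuel ih =>
    intro k hk
    rw [snakeLoopA]
    by_cases hlt : ((patPow (snakePat n_folds) k).length : Int) < n_groups
    · rw [if_pos hlt]
      simp only
      by_cases hdone : n_groups ≤ (((patPow (snakePat n_folds) k ++ PySem.List.pyRange 0 n_folds 1).length : Nat) : Int)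
      · rw [if_pos hdone]
        refine ⟨k + 1, ?_, hdone⟩
        refine ⟨(if 1 < n_folds then PySem.List.pyRange (n_folds - 1) (-1) (-1) else []), ?_⟩
        rw [List.append_assoc]
        rfl
      · rw [if_neg hdone]
        by_cases hgt : 1 < n_folds
        · rw [if_pos hgt]
          have hstep : patPow (snakePat n_folds) k ++ PySem.List.pyRange 0 n_folds 1 ++ PySem.List.pyRange (n_folds - 1) (-1) (-1)
              = patPow (snakePat n_folds) (k + 1) := by
            rw [List.append_assoc]
            show _ ++ _ = patPow (snakePat n_folds) k ++ snakePat n_folds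
            rw [snakePat, if_pos hgt]
          rw [hstep]
          apply ih
          have : (patPow (snakePat n_folds) (k + 1)).length = (patPow (snakePat n_folds) k).length + (snakePat n_folds).length := by
            simp [patPow]
          omega
        · rw [if_neg hgt]
          have hstep : patPow (snakePat n_folds) k ++ PySem.List.pyRange 0 n_folds 1 = patPow (snakePat n_folds) (k + 1) := by
            show _ = patPow (snakePat n_folds) k ++ snakePat n_folds
            rw [snakePat, if_neg hgt, List.append_nil]
          rw [hstep]
          apply ih
          have : (patPow (snakePat n_folds) (k + 1)).length = (patPow (snakePat n_folds) k).length + (snakePat n_folds).length := by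
            simp [patPow]
          omega
    · rw [if_neg hlt]
      exact ⟨k, List.prefix_refl _, by omega⟩

lemma slice_to_nil (b : Int) : PySem.List.slice ([] : List Int) none (some b) = [] := by
  by_cases hb : 0 ≤ b
  · rw [PySem.List.slice_to _ hb]; simp
  · simp [PySem.List.slice]

-- B unfolded to a map of the closed-form value over the index range
lemma alt_eq_map (n_groups : Int) (n_folds : Int) :
    snake_fold_order_py_alt n_groups n_folds
      = (PySem.List.pyRange 0 n_groups 1).map (snakeF n_folds) := by
  unfold snake_fold_order_py_alt snakeF
  simp only
  rw [PySem.List.foldl_append_singleton_eq_map]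
  simp

-- ===== VERDICT (by name: the statement is the Claim_ definition above) =====
theorem snake_fold_order_py_spec : Claim_equal_snake_fold_order_py := by
  intro n_groups n_folds _ hpre
  unfold Spec_snake_fold_order_py snake_fold_order_py
  rw [alt_eq_map]
  by_cases hg : n_groups ≤ 0
  · -- A's loop condition is false at the start; B's range is empty
    have h0 : n_groups.toNat = 0 := by omega
    rw [h0]
    rw [show snakeLoopA n_groups n_folds 1 [] = [] by
      rw [snakeLoopA]; rw [if_neg (by simp; omega)]]
    rw [slice_to_nil, PySem.List.pyRange_one_eq_nil (by omega)]
    simp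
  · have hf : 1 ≤ n_folds := hpre.resolve_left hg
    have hpatlen := snakePat_length_pos n_folds hf
    have h0 : ([] : List Int) = patPow (snakePat n_folds) 0 := rfl
    have hfuel : n_groups ≤ ((patPow (snakePat n_folds) 0).length : Int) + (n_groups.toNat + 1 : Nat) := by
      simp [patPow]; omega
    obtain ⟨mA, hA, hAlen⟩ := loopA_spec n_groups n_folds hf (n_groups.toNat + 1) 0 hfuel
    rw [h0]
    have hg' : (0:Int) ≤ n_groups := by omega
    rw [PySem.List.slice_to _ hg']
    -- the loop result's take equals the take of the big tiling it is a prefix of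
    rw [take_eq_of_prefix hA (by omega)]
    -- both sides have length n_groups.toNat; compare elementwise
    have hlenA : n_groups.toNat ≤ (patPow (snakePat n_folds) mA).length := by
      have := hA.length_le
      omega
    apply List.ext_getElem
    · simp [PySem.List.length_pyRange_one]
      omega
    · intro i h1 h2
      have hi : i < n_groups.toNat := by
        simp at h1; omega
      rw [List.getElem_take, List.getElem_map, PySem.List.getElem_pyRange_one]
      rw [patPow_getElem _ hpatlen mA i (by omega)]
      rw [snakePat_getElem n_folds hf _ (Nat.mod_lt _ hpatlen)]
      rw [← snakeF_mod_pat n_folds hf i]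
      norm_num
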